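-- pv_equiv track=rewrite | github.com/mrofcodyx/MailMul | mailmul.py | dot_variants
-- ===== SOURCE A (Python) =====
-- def dot_variants(name: str) -> list[str]:
--     if len(name) <= 1:
--         return [name]
--     gaps = len(name) - 1
--     variants = []
--     for mask in range(1 << gaps):
--         parts = [name[0]]
--         for i in range(gaps):
--             if mask & (1 << i):
--                 parts.append(".")
--             parts.append(name[i + 1])
--         variants.append("".join(parts))
--     return variants
-- ===== SOURCE B (Python) =====
-- def dot_variants(name: str) -> list[str]:
--     if len(name) <= 1:
--         return [name]
--     head = dot_variants(name[:-1])
--     last = name[-1]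
--     return [h + last for h in head] + [h + "." + last for h in head]
-- ===== Notes on version B (the rewrite author's own statement) =====
-- stated objective: alternative
-- what changed: Replaces bitmask decoding (an outer loop over 2^gaps integer masks with an inner per-bit loop rebuilding each string from parts) by prefix recursion that doubles the variant list one character at a time, appending each new character without and then with a dot.
import Mathlib
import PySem

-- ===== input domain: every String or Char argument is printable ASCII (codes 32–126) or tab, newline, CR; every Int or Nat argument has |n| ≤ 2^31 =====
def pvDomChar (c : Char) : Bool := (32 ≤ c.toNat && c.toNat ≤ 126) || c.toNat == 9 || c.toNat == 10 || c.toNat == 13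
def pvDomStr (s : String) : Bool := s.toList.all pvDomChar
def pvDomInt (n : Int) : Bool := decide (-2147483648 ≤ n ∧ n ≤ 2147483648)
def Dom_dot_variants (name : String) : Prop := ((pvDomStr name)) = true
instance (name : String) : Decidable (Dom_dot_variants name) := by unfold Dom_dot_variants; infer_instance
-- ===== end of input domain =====

-- B replaces A's bitmask decoding by a prefix recursion that doubles the variant
-- list one character at a time (alternative decomposition, same asymptotic cost).

-- ===== PORT A =====
-- inner loop of A: builds the `parts` list for one mask
def dotPartsA (cs : List Char) (gaps : Nat) (mask : Nat) : List String :=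
  (List.range gaps).foldl
    (fun parts i =>
      (if mask &&& (1 <<< i) ≠ 0 then parts ++ ["."] else parts)
        ++ [String.ofList [cs.getD (i + 1) ' ']])
    [String.ofList (cs.take 1)]

def dot_variants (name : String) : List String :=
  let cs := name.toList
  if cs.length ≤ 1 then [name]
  else
    let gaps := cs.length - 1
    (List.range (2 ^ gaps)).foldl
      (fun variants mask => variants ++ [String.join (dotPartsA cs gaps mask)]) []

-- ===== PORT B =====
-- B recurses on name[:-1]; here the string is recursed over as its reversed char list.
def dotVariantsB : List Char → List String
  | [] => [""]
  | [c] => [String.ofList [c]]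
  | c :: rest =>
      let head := dotVariantsB rest
      head.map (fun h => h ++ String.ofList [c]) ++ head.map (fun h => h ++ "." ++ String.ofList [c])

def dot_variants_alt (name : String) : List String :=
  dotVariantsB name.toList.reverse

-- ===== PRECONDITION & SPEC =====
def Spec_dot_variants (name : String) (out : List String) : Prop := out = dot_variants_alt name
instance (name : String) (out : List String) : Decidable (Spec_dot_variants name out) := by unfold Spec_dot_variants; infer_instance

-- ===== CLAIM (what is proved, stated in full; the proofs are below) =====
def Claim_equal_dot_variants : Prop := ∀ (name : String), Dom_dot_variants name → Spec_dot_variants name (dot_variants name)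

-- ===== LEMMAS AND PROOFS =====

theorem pv_foldl_append_map {α β : Type} (f : α → β) :
    ∀ (l : List α) (acc : List β),
      l.foldl (fun a x => a ++ [f x]) acc = acc ++ l.map f := by
  intro l
  induction l with
  | nil => simp
  | cons x xs ih => intro acc; simp [List.foldl, ih]

theorem pv_foldl_str : ∀ (xs : List String) (a : String),
    xs.foldl (fun r s => r ++ s) a = a ++ xs.foldl (fun r s => r ++ s) "" := by
  intro xs
  induction xs with
  | nil => simp
  | cons x l ih =>
      intro a
      show l.foldl _ (a ++ x) = a ++ l.foldl _ ("" ++ x)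
      rw [ih (a ++ x), ih ("" ++ x)]
      simp [String.append_assoc]

theorem pv_join_cons (x : String) (xs : List String) :
    String.join (x :: xs) = x ++ String.join xs := by
  simp [String.join, List.foldl]
  rw [pv_foldl_str]

theorem pv_join_append (l l' : List String) :
    String.join (l ++ l') = String.join l ++ String.join l' := by
  induction l with
  | nil => simp [String.join]
  | cons x xs ih =>
      rw [List.cons_append, pv_join_cons, pv_join_cons, ih, String.append_assoc]

theorem pv_and_shift (mask i : Nat) :
    (mask &&& (1 <<< i) ≠ 0) ↔ (mask.testBit i = true) := by
  rw [Nat.shiftLeft_eq, one_mul, Nat.and_two_pow]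
  have h2 : (0:Nat) < 2 ^ i := Nat.two_pow_pos i
  cases h : mask.testBit i <;> simp

-- two masks agreeing on the low bits give the same parts over the same prefix
theorem pv_parts_congr (cs cs' : List Char) (g : Nat) (m m' : Nat)
    (hc : ∀ i, i < g → cs.getD (i + 1) ' ' = cs'.getD (i + 1) ' ')
    (h0 : cs.take 1 = cs'.take 1)
    (hb : ∀ i, i < g → m.testBit i = m'.testBit i) :
    dotPartsA cs g m = dotPartsA cs' g m' := by
  unfold dotPartsA
  rw [h0]
  induction g with
  | zero => simp
  | succ k ih =>
      rw [List.range_succ, List.foldl_append, List.foldl_append]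
      rw [ih (fun i hi => hc i (Nat.lt_succ_of_lt hi)) (fun i hi => hb i (Nat.lt_succ_of_lt hi))]
      simp only [List.foldl]
      rw [hc k (Nat.lt_succ_self k)]
      have hiff : (m &&& (1 <<< k) ≠ 0) ↔ (m' &&& (1 <<< k) ≠ 0) := by
        rw [pv_and_shift, pv_and_shift, hb k (Nat.lt_succ_self k)]
      split_ifs with h1 h2 h2 <;>
        first | rfl | (exact absurd (hiff.mp h1) h2) | (exact absurd (hiff.mpr h2) h1)

-- extending the string by one character peels off the last loop step
theorem pv_parts_snoc (ps : List Char) (c : Char) (m n : Nat) (hn : ps.length = n + 1) :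
    dotPartsA (ps ++ [c]) (n + 1) m
      = dotPartsA ps n m
        ++ (if m.testBit n then ["."] else []) ++ [String.ofList [c]] := by
  unfold dotPartsA
  rw [List.range_succ, List.foldl_append]
  have hcong :
      (List.range n).foldl
        (fun parts i =>
          (if m &&& (1 <<< i) ≠ 0 then parts ++ ["."] else parts)
            ++ [String.ofList [(ps ++ [c]).getD (i + 1) ' ']])
        [String.ofList ((ps ++ [c]).take 1)]
      = (List.range n).foldl
        (fun parts i =>
          (if m &&& (1 <<< i) ≠ 0 then parts ++ ["."] else parts)
            ++ [String.ofList [ps.getD (i + 1) ' ']])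
        [String.ofList (ps.take 1)] := by
    have := pv_parts_congr (ps ++ [c]) ps n m m
      (fun i hi => by rw [List.getD_append]; omega)
      (by rw [List.take_append_of_le_length]; omega)
      (fun _ _ => rfl)
    simpa [dotPartsA] using this
  rw [hcong]
  simp only [List.foldl]
  have hget : (ps ++ [c]).getD (n + 1) ' ' = c := by
    have : (ps ++ [c]).getD ps.length ' ' = c := by
      simp [List.getD]
    rwa [hn] at this
  rw [hget]
  by_cases hb : m.testBit n
  · rw [if_pos ((pv_and_shift m n).mpr hb), if_pos hb]
  · rw [if_neg (fun hc' => hb ((pv_and_shift m n).mp hc')), if_neg hb]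
    simp

-- render one mask to its string (A's value for a single mask)
def renderA (cs : List Char) (m : Nat) : String := String.join (dotPartsA cs (cs.length - 1) m)

-- key lemma: B (on the reversed list) enumerates exactly A's mask order
theorem pv_key : ∀ (rs : List Char), rs ≠ [] →
    dotVariantsB rs = (List.range (2 ^ (rs.length - 1))).map (fun m => renderA rs.reverse m) := by
  intro rs
  induction rs with
  | nil => intro h; exact absurd rfl h
  | cons c rest ih =>
      intro _
      cases rest with
      | nil => simp [dotVariantsB, renderA, dotPartsA, String.join]
      | cons d ds =>
          have hne : (d :: ds) ≠ [] := by simp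
          rw [show dotVariantsB (c :: d :: ds)
              = (dotVariantsB (d :: ds)).map (fun h => h ++ String.ofList [c])
                ++ (dotVariantsB (d :: ds)).map (fun h => h ++ "." ++ String.ofList [c]) from rfl]
          rw [ih hne]
          set ps := (d :: ds).reverse with hps
          have hlen : ps.length = ds.length + 1 := by simp [hps]
          have hrev : (c :: d :: ds).reverse = ps ++ [c] := by simp [hps]
          rw [hrev]
          have hglen : (c :: d :: ds).length - 1 = ds.length + 1 := by simp
          rw [hglen]
          set n := ds.length with hnd
          have hlen1 : (d :: ds).length - 1 = n := by simp [hnd]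
          rw [hlen1]
          have hsplit : (2 : Nat) ^ (n + 1) = 2 ^ n + 2 ^ n := by ring
          rw [hsplit, List.range_add, List.map_append, List.map_map, List.map_map, List.map_map]
          have hrlen : (ps ++ [c]).length - 1 = n + 1 := by simp [hlen]
          congr 1
          · apply List.map_congr_left
            intro m hm
            have hmlt : m < 2 ^ n := List.mem_range.mp hm
            show renderA ps m ++ String.ofList [c] = renderA (ps ++ [c]) m
            unfold renderA
            have hbit : m.testBit n = false := Nat.testBit_lt_two_pow hmlt
            rw [show ps.length - 1 = n from by omega, hrlen,
                pv_parts_snoc ps c m n hlen]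
            simp only [hbit, Bool.false_eq_true, if_false, List.append_nil]
            rw [pv_join_append]
            simp [String.join]
          · apply List.map_congr_left
            intro m hm
            have hmlt : m < 2 ^ n := List.mem_range.mp hm
            show renderA ps m ++ "." ++ String.ofList [c] = renderA (ps ++ [c]) (2 ^ n + m)
            unfold renderA
            have hbit : (2 ^ n + m).testBit n = true := by
              rw [Nat.testBit_two_pow_add_eq, Nat.testBit_lt_two_pow hmlt]; rfl
            rw [show ps.length - 1 = n from by omega, hrlen,
                pv_parts_snoc ps c (2 ^ n + m) n hlen]
            simp only [hbit, if_true]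
            have hlow : dotPartsA ps n (2 ^ n + m) = dotPartsA ps n m := by
              apply pv_parts_congr _ _ _ _ _ (fun _ _ => rfl) rfl
              intro i hi
              have := Nat.testBit_two_pow_mul_add 1 (b := m) hmlt i
              simpa [hi] using this
            rw [hlow, pv_join_append, pv_join_append]
            simp [String.join, String.append_assoc]

-- ===== VERDICT (by name: the statement is the Claim_ definition above) =====
theorem dot_variants_spec : Claim_equal_dot_variants := by
  intro name _
  unfold Spec_dot_variants dot_variants dot_variants_alt
  by_cases h : name.toList.length ≤ 1
  · simp only [h, if_true]
    cases hcs : name.toList with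
    | nil =>
        have hname : name = "" := by simpa using congrArg String.ofList hcs
        rw [hname]
        rfl
    | cons c rest =>
        cases rest with
        | nil =>
            have hname : name = String.ofList [c] := by
              simpa [hcs] using (String.ofList_toList (s := name)).symm
            rw [hname]
            rfl
        | cons d ds => rw [hcs] at h; simp at h
  · simp only [h, if_false]
    have hne : name.toList ≠ [] := by
      intro hc; rw [hc] at h; simp at h
    have hrne : name.toList.reverse ≠ [] := by simpa using hne
    rw [pv_foldl_append_map, pv_key _ hrne]
    simp [renderA]
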